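-- pv_equiv track=rewrite | github.com/edleeman17/Sift | sms-assistant/assistant.py | get_ack_message
-- ===== SOURCE A (Python) =====
-- from typing import Optional, Tuple
--
-- def get_ack_message(text: str) -> Optional[str]:
--     """Return acknowledgement message for long-running commands, or None for quick ones."""
--     text_upper = text.strip().upper()
--
--     # Quick commands that don't need acks
--     quick_commands = {"HELP", "PING", "TODO", "LOCATE", "WEATHER", "TIMER"}
--     if text_upper in quick_commands:
--         return None
--     if text_upper.startswith("TODO "):
--         return None
--     if text_upper.startswith("DONE "):
--         return None
--     if text_upper.startswith("WEATHER "):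
--         return None
--     if text_upper.startswith("TIMER "):
--         return None
--     if text_upper.startswith("CALL "):
--         return None  # Fast local lookup
--     if text_upper.startswith("CONTACT "):
--         return None  # Fast API lookup
--     if text_upper == "BORED":
--         return None
--     if text_upper == "RAIN" or text_upper.startswith("RAIN "):
--         return None
--     if text_upper == "BIN":
--         return None
--     if text_upper == "BRIEFING":
--         return "Getting your briefing..."
--     if text_upper.startswith("REMIND "):
--         return None
--     if text_upper == "INSURANCE":
--         return None
--     if text_upper == "ICE":
--         return None
--
--     # Long-running commands get acks
--     if text_upper == "RESET":
--         return "Resetting Pi Bluetooth..."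
--     if text_upper == "MESSAGES":
--         return "Checking messages..."
--     if text_upper.startswith("NAV "):
--         return "Getting directions..."
--
--     # Everything else goes to LLM classification/processing
--     # Determine likely command for better ack
--     text_lower = text.lower()
--     if any(word in text_lower for word in ["search", "look up", "find", "what is", "who is"]):
--         return "Searching..."
--     if any(word in text_lower for word in ["weather", "rain", "temperature", "forecast"]):
--         return "Checking weather..."
--
--     # Generic LLM query
--     return "Thinking..."
-- ===== SOURCE B (Python) =====
-- from typing import Optional
--
-- # First-token dispatch: split the stripped/uppercased text at its first space into
-- # (head, has_tail) and classify by which of three head-sets it falls in, then scan a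
-- # single flat prioritized keyword list over the lowercased raw text.
--
-- _ANY_TAIL = {"TODO", "WEATHER", "TIMER", "RAIN"}          # None whether or not arguments follow
-- _NO_TAIL = {"HELP", "PING", "LOCATE", "BORED", "BIN", "INSURANCE", "ICE"}   # None only as a bare word
-- _NEED_TAIL = {"DONE", "CALL", "CONTACT", "REMIND"}        # None only with arguments
--
-- _BARE_ACKS = {"BRIEFING": "Getting your briefing...",
--               "RESET": "Resetting Pi Bluetooth...",
--               "MESSAGES": "Checking messages..."}
--
-- _FLAT_KEYWORDS = [
--     ("search", "Searching..."), ("look up", "Searching..."), ("find", "Searching..."),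
--     ("what is", "Searching..."), ("who is", "Searching..."),
--     ("weather", "Checking weather..."), ("rain", "Checking weather..."),
--     ("temperature", "Checking weather..."), ("forecast", "Checking weather..."),
-- ]
--
--
-- def get_ack_message(text: str) -> Optional[str]:
--     """Return acknowledgement message for long-running commands, or None for quick ones."""
--     head, sep, _rest = text.strip().upper().partition(" ")
--     has_tail = bool(sep)
--     if head in _ANY_TAIL:
--         return None
--     if has_tail:
--         if head in _NEED_TAIL:
--             return None
--         if head == "NAV":
--             return "Getting directions..."
--     else:
--         if head in _NO_TAIL:
--             return None
--         if head in _BARE_ACKS: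
--             return _BARE_ACKS[head]
--     text_lower = text.lower()
--     for kw, msg in _FLAT_KEYWORDS:
--         if kw in text_lower:
--             return msg
--     return "Thinking..."
-- ===== Notes on version B (the rewrite author's own statement) =====
-- stated objective: alternative
-- what changed: Instead of A's cascade of exact-match and startswith tests, B partitions the stripped/uppercased text at its first space into (head, has_tail) and classifies the head against three sets keyed by whether arguments follow, falling through to a single flat prioritized keyword list instead of two grouped any() scans.
import Mathlib
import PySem

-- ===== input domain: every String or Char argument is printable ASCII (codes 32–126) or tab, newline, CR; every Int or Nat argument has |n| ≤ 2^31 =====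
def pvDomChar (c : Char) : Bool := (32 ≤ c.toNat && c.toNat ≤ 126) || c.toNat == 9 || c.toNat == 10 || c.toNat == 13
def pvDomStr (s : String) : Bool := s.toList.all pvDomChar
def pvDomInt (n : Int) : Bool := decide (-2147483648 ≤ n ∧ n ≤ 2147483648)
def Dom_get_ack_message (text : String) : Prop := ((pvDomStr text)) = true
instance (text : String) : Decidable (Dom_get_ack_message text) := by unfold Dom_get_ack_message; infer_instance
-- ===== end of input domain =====

-- B replaces A's if-chain of exact/startswith tests by a first-token dispatch
-- (partition at the first space into head + has_tail, classify the head) and a single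
-- flat prioritized keyword list (objective: simpler).

-- ===== PORT A =====
def get_ack_message (text : String) : Option String :=
  let tu := PySem.Str.upper (PySem.Str.strip text)
  if (["HELP", "PING", "TODO", "LOCATE", "WEATHER", "TIMER"] : List String).contains tu then none
  else if PySem.Str.startswith tu "TODO " then none
  else if PySem.Str.startswith tu "DONE " then none
  else if PySem.Str.startswith tu "WEATHER " then none
  else if PySem.Str.startswith tu "TIMER " then none
  else if PySem.Str.startswith tu "CALL " then none
  else if PySem.Str.startswith tu "CONTACT " then none
  else if tu == "BORED" then none
  else if tu == "RAIN" || PySem.Str.startswith tu "RAIN " then none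
  else if tu == "BIN" then none
  else if tu == "BRIEFING" then some "Getting your briefing..."
  else if PySem.Str.startswith tu "REMIND " then none
  else if tu == "INSURANCE" then none
  else if tu == "ICE" then none
  else if tu == "RESET" then some "Resetting Pi Bluetooth..."
  else if tu == "MESSAGES" then some "Checking messages..."
  else if PySem.Str.startswith tu "NAV " then some "Getting directions..."
  else
    let tl := PySem.Str.lower text
    if (["search", "look up", "find", "what is", "who is"] : List String).any (fun w => PySem.Str.isIn w tl) then some "Searching..."
    else if (["weather", "rain", "temperature", "forecast"] : List String).any (fun w => PySem.Str.isIn w tl) then some "Checking weather..."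
    else some "Thinking..."

-- ===== PORT B =====
-- str.partition(" ") restricted to what B uses: (part before first space, whether a space occurred)
def pvPartitionSp : List Char → List Char × Bool
  | [] => ([], false)
  | c :: cs =>
      if c = ' ' then ([], true)
      else
        let p := pvPartitionSp cs
        (c :: p.1, p.2)

def pvAnyTail : List String := ["TODO", "WEATHER", "TIMER", "RAIN"]
def pvNoTail : List String := ["HELP", "PING", "LOCATE", "BORED", "BIN", "INSURANCE", "ICE"]
def pvNeedTail : List String := ["DONE", "CALL", "CONTACT", "REMIND"]
def pvBareAcks : PySem.Dict String String :=
  PySem.Dict.ofList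
    [("BRIEFING", "Getting your briefing..."),
     ("RESET", "Resetting Pi Bluetooth..."),
     ("MESSAGES", "Checking messages...")]

def pvFlatKw : List (String × String) :=
  [("search", "Searching..."), ("look up", "Searching..."), ("find", "Searching..."),
   ("what is", "Searching..."), ("who is", "Searching..."),
   ("weather", "Checking weather..."), ("rain", "Checking weather..."),
   ("temperature", "Checking weather..."), ("forecast", "Checking weather...")]

-- B's final for-loop: first keyword that is a substring of tl wins
def pvKwScan (tl : String) : List (String × String) → Option String
  | [] => none
  | (kw, msg) :: rest => if PySem.Str.isIn kw tl then some msg else pvKwScan tl rest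

def get_ack_message_alt (text : String) : Option String :=
  let p := pvPartitionSp (PySem.Str.upper (PySem.Str.strip text)).toList
  let head : String := String.ofList p.1
  let hasTail : Bool := p.2
  if pvAnyTail.contains head then none
  else if hasTail && pvNeedTail.contains head then none
  else if hasTail && head == "NAV" then some "Getting directions..."
  else if !hasTail && pvNoTail.contains head then none
  else
    match if !hasTail then pvBareAcks.get? head else none with
    | some m => some m
    | none =>
      let tl := PySem.Str.lower text
      match pvKwScan tl pvFlatKw with
      | some m => some m
      | none => some "Thinking..."

-- ===== PRECONDITION & SPEC =====
def Spec_get_ack_message (text : String) (out : Option String) : Prop := out = get_ack_message_alt text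
instance (text : String) (out : Option String) : Decidable (Spec_get_ack_message text out) := by unfold Spec_get_ack_message; infer_instance

-- ===== CLAIM (what is proved, stated in full; the proofs are below) =====
def Claim_equal_get_ack_message : Prop := ∀ (text : String), Dom_get_ack_message text → Spec_get_ack_message text (get_ack_message text)

-- ===== LEMMAS AND PROOFS =====

-- pvPartitionSp with no space found: the head is the whole list and it contains no space
theorem pvPart_false (l : List Char) (h : (pvPartitionSp l).2 = false) :
    (pvPartitionSp l).1 = l ∧ ' ' ∉ l := by
  induction l with
  | nil => simp [pvPartitionSp]
  | cons c cs ih =>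
      by_cases hc : c = ' '
      · simp [pvPartitionSp, hc] at h
      · simp [pvPartitionSp, hc] at h ⊢
        rcases ih h with ⟨h1, h2⟩
        exact ⟨h1, fun hs => hc hs.symm, h2⟩

-- pvPartitionSp with a space found: the list is head ++ ' ' :: rest and the head has no space
theorem pvPart_true : ∀ (l : List Char), (pvPartitionSp l).2 = true →
    (∃ r, l = (pvPartitionSp l).1 ++ ' ' :: r) ∧ ' ' ∉ (pvPartitionSp l).1 := by
  intro l
  induction l with
  | nil => intro h; simp [pvPartitionSp] at h
  | cons c cs ih =>
      intro h
      by_cases hc : c = ' '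
      · subst hc
        exact ⟨⟨cs, by simp [pvPartitionSp]⟩, by simp [pvPartitionSp]⟩
      · have h' : (pvPartitionSp cs).2 = true := by
          simpa [pvPartitionSp, hc] using h
        rcases ih h' with ⟨⟨r, hr⟩, h2⟩
        refine ⟨⟨r, ?_⟩, ?_⟩
        · simp [pvPartitionSp, hc]
          exact hr
        · simp [pvPartitionSp, hc]
          exact ⟨fun hs => hc hs.symm, h2⟩

-- a list with no space does not start with "w ++ space"
theorem no_space_not_startswith (l w : List Char) (h : ' ' ∉ l) :
    PySem.Chars.startswith l (w ++ [' ']) = false := by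
  rw [Bool.eq_false_iff]
  intro hb
  rcases (PySem.Chars.startswith_iff _ _).1 hb with ⟨r, hr⟩
  apply h
  rw [← hr]; simp

-- prefix of head ++ ' ' :: r by w ++ [' '] with space-free head and w forces w = head
theorem prefix_part : ∀ (w hd r : List Char), ' ' ∉ hd → ' ' ∉ w →
    ((w ++ [' ']) <+: (hd ++ ' ' :: r)) → w = hd := by
  intro w
  induction w with
  | nil =>
      intro hd r hhd _ hpre
      cases hd with
      | nil => rfl
      | cons c cs =>
          rcases hpre with ⟨t, ht⟩
          simp at ht
          exact absurd ht.1.symm (fun h => hhd (h ▸ List.mem_cons_self))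
  | cons a as ih =>
      intro hd r hhd hw hpre
      cases hd with
      | nil =>
          rcases hpre with ⟨t, ht⟩
          simp at ht
          exact absurd ht.1 (fun h => hw (h ▸ List.mem_cons_self))
      | cons c cs =>
          rcases hpre with ⟨t, ht⟩
          simp at ht
          obtain ⟨hac, hrest⟩ := ht
          have has : as = cs :=
            ih cs r (fun h => hhd (List.mem_cons_of_mem _ h))
               (fun h => hw (List.mem_cons_of_mem _ h)) ⟨t, by simpa using hrest⟩
          rw [hac, has]

-- startswith "w ++ space" on head ++ ' ' :: r with space-free head and w: holds iff w = head
theorem startswith_part (hd w r : List Char) (hhd : ' ' ∉ hd) (hw : ' ' ∉ w) :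
    PySem.Chars.startswith (hd ++ ' ' :: r) (w ++ [' ']) = true ↔ w = hd := by
  rw [PySem.Chars.startswith_iff]
  constructor
  · exact prefix_part w hd r hhd hw
  · rintro rfl
    exact ⟨r, by simp⟩

-- a string containing a space differs from any space-free literal
theorem ne_of_space_mem (tu w : String) (h : ' ' ∈ tu.toList) (hw : ' ' ∉ w.toList) :
    tu ≠ w := by
  rintro rfl; exact hw h

-- B's flat keyword loop over a block of keywords sharing one message
theorem kwScan_block (tl : String) (ws : List String) (m : String) (rest : List (String × String)) :
    pvKwScan tl (ws.map (fun w => (w, m)) ++ rest) =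
      if ws.any (fun w => PySem.Str.isIn w tl) then some m else pvKwScan tl rest := by
  induction ws with
  | nil => simp
  | cons w ws ih =>
      by_cases hw : PySem.Chars.isIn w.toList tl.toList = true
      · simp [pvKwScan, hw]
      · simp only [Bool.not_eq_true] at hw
        simp [pvKwScan, hw, ih]

-- pvPartitionSp on a space-free head followed by a space: head and flag are recovered
theorem pvPart_of_append : ∀ (w r : List Char), ' ' ∉ w → pvPartitionSp (w ++ ' ' :: r) = (w, true) := by
  intro w
  induction w with
  | nil => intro r _; simp [pvPartitionSp]
  | cons a as ih =>
      intro r hw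
      have ha : ¬ a = ' ' := fun h => hw (by simp [h])
      have has : ' ' ∉ as := fun h => hw (by simp [h])
      simp [pvPartitionSp, ha, ih r has]

-- ===== VERDICT (by name: the statement is the Claim_ definition above) =====
set_option maxHeartbeats 4000000 in
theorem get_ack_message_spec : Claim_equal_get_ack_message := by
  intro text _
  unfold Spec_get_ack_message get_ack_message get_ack_message_alt
  dsimp only
  generalize htl : PySem.Str.lower text = tl
  generalize htu : PySem.Str.upper (PySem.Str.strip text) = tu
  -- keyword fallthrough agreement, used in every non-command branch
  have hkw :
      (if (["search", "look up", "find", "what is", "who is"] : List String).any (fun w => PySem.Str.isIn w tl) then some "Searching..."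
       else if (["weather", "rain", "temperature", "forecast"] : List String).any (fun w => PySem.Str.isIn w tl) then some "Checking weather..."
       else some "Thinking...") =
      (match pvKwScan tl pvFlatKw with
       | some m => some m
       | none => (some "Thinking..." : Option String)) := by
    have h1 : pvFlatKw =
        (["search", "look up", "find", "what is", "who is"] : List String).map (fun w => (w, "Searching...")) ++
        ((["weather", "rain", "temperature", "forecast"] : List String).map (fun w => (w, "Checking weather...")) ++ []) := rfl
    rw [h1, kwScan_block, kwScan_block]
    split_ifs <;> simp [pvKwScan]
  cases hpt : (pvPartitionSp tu.toList).2 with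
  | false =>
    -- no space in tu: tu = head; all of A's startswith tests are false
    rcases pvPart_false tu.toList hpt with ⟨hhd, hsp⟩
    have hmk : String.ofList (pvPartitionSp tu.toList).1 = tu := by
      rw [hhd, String.ofList_toList]
    have s1 : PySem.Chars.startswith tu.toList ['T','O','D','O',' '] = false := by
      simpa using no_space_not_startswith tu.toList ['T','O','D','O'] hsp
    have s2 : PySem.Chars.startswith tu.toList ['D','O','N','E',' '] = false := by
      simpa using no_space_not_startswith tu.toList ['D','O','N','E'] hsp
    have s3 : PySem.Chars.startswith tu.toList ['W','E','A','T','H','E','R',' '] = false := by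
      simpa using no_space_not_startswith tu.toList ['W','E','A','T','H','E','R'] hsp
    have s4 : PySem.Chars.startswith tu.toList ['T','I','M','E','R',' '] = false := by
      simpa using no_space_not_startswith tu.toList ['T','I','M','E','R'] hsp
    have s5 : PySem.Chars.startswith tu.toList ['C','A','L','L',' '] = false := by
      simpa using no_space_not_startswith tu.toList ['C','A','L','L'] hsp
    have s6 : PySem.Chars.startswith tu.toList ['C','O','N','T','A','C','T',' '] = false := by
      simpa using no_space_not_startswith tu.toList ['C','O','N','T','A','C','T'] hsp
    have s7 : PySem.Chars.startswith tu.toList ['R','A','I','N',' '] = false := by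
      simpa using no_space_not_startswith tu.toList ['R','A','I','N'] hsp
    have s8 : PySem.Chars.startswith tu.toList ['R','E','M','I','N','D',' '] = false := by
      simpa using no_space_not_startswith tu.toList ['R','E','M','I','N','D'] hsp
    have s9 : PySem.Chars.startswith tu.toList ['N','A','V',' '] = false := by
      simpa using no_space_not_startswith tu.toList ['N','A','V'] hsp
    by_cases h1 : tu = "HELP"; · subst h1; rfl
    by_cases h2 : tu = "PING"; · subst h2; rfl
    by_cases h3 : tu = "TODO"; · subst h3; rfl
    by_cases h4 : tu = "LOCATE"; · subst h4; rfl
    by_cases h5 : tu = "WEATHER"; · subst h5; rfl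
    by_cases h6 : tu = "TIMER"; · subst h6; rfl
    by_cases h7 : tu = "BORED"; · subst h7; rfl
    by_cases h8 : tu = "RAIN"; · subst h8; rfl
    by_cases h9 : tu = "BIN"; · subst h9; rfl
    by_cases h10 : tu = "BRIEFING"; · subst h10; rfl
    by_cases h11 : tu = "INSURANCE"; · subst h11; rfl
    by_cases h12 : tu = "ICE"; · subst h12; rfl
    by_cases h13 : tu = "RESET"; · subst h13; rfl
    by_cases h14 : tu = "MESSAGES"; · subst h14; rfl
    -- all exact commands ruled out: both sides fall through to the keyword scan
    have i1 : ("BRIEFING" == tu) = false := beq_eq_false_iff_ne.2 (Ne.symm h10)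
    have i2 : ("RESET" == tu) = false := beq_eq_false_iff_ne.2 (Ne.symm h13)
    have i3 : ("MESSAGES" == tu) = false := beq_eq_false_iff_ne.2 (Ne.symm h14)
    have hbare : pvBareAcks.get? tu = none := by
      rw [show pvBareAcks.get? tu = Option.map (fun x => x.2)
            (List.find? (fun p => p.1 == tu)
              [("BRIEFING", "Getting your briefing..."), ("RESET", "Resetting Pi Bluetooth..."),
               ("MESSAGES", "Checking messages...")]) from rfl]
      simp [List.find?, i1, i2, i3]
    rw [hkw]
    simp [PySem.Str.startswith,
      (show ("TODO ").toList = ['T','O','D','O',' '] from rfl),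
      (show ("DONE ").toList = ['D','O','N','E',' '] from rfl),
      (show ("WEATHER ").toList = ['W','E','A','T','H','E','R',' '] from rfl),
      (show ("TIMER ").toList = ['T','I','M','E','R',' '] from rfl),
      (show ("CALL ").toList = ['C','A','L','L',' '] from rfl),
      (show ("CONTACT ").toList = ['C','O','N','T','A','C','T',' '] from rfl),
      (show ("RAIN ").toList = ['R','A','I','N',' '] from rfl),
      (show ("REMIND ").toList = ['R','E','M','I','N','D',' '] from rfl),
      (show ("NAV ").toList = ['N','A','V',' '] from rfl),
      hmk, hpt, pvAnyTail, pvNoTail, pvNeedTail, hbare,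
      h1, h2, h3, h4, h5, h6, h7, h8, h9, h10, h11, h12, h13, h14,
      s1, s2, s3, s4, s5, s6, s7, s8, s9]
  | true =>
    -- tu = head ++ ' ' :: r with space-free head: A's exact tests are all false
    rcases pvPart_true tu.toList hpt with ⟨⟨r, hr⟩, hhd⟩
    generalize hHD : (pvPartitionSp tu.toList).1 = hd at hr hhd
    have hspm : ' ' ∈ tu.toList := by rw [hr]; simp
    have hP : pvPartitionSp tu.toList = (hd, true) := by
      rw [hr]; exact pvPart_of_append hd r hhd
    have e1 : tu ≠ "HELP" := ne_of_space_mem _ _ hspm (by decide)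
    have e2 : tu ≠ "PING" := ne_of_space_mem _ _ hspm (by decide)
    have e3 : tu ≠ "TODO" := ne_of_space_mem _ _ hspm (by decide)
    have e4 : tu ≠ "LOCATE" := ne_of_space_mem _ _ hspm (by decide)
    have e5 : tu ≠ "WEATHER" := ne_of_space_mem _ _ hspm (by decide)
    have e6 : tu ≠ "TIMER" := ne_of_space_mem _ _ hspm (by decide)
    have e7 : tu ≠ "BORED" := ne_of_space_mem _ _ hspm (by decide)
    have e8 : tu ≠ "RAIN" := ne_of_space_mem _ _ hspm (by decide)
    have e9 : tu ≠ "BIN" := ne_of_space_mem _ _ hspm (by decide)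
    have e10 : tu ≠ "BRIEFING" := ne_of_space_mem _ _ hspm (by decide)
    have e11 : tu ≠ "INSURANCE" := ne_of_space_mem _ _ hspm (by decide)
    have e12 : tu ≠ "ICE" := ne_of_space_mem _ _ hspm (by decide)
    have e13 : tu ≠ "RESET" := ne_of_space_mem _ _ hspm (by decide)
    have e14 : tu ≠ "MESSAGES" := ne_of_space_mem _ _ hspm (by decide)
    -- each startswith test reduces to an equality test on the head
    have hsw : ∀ w : List Char, ' ' ∉ w →
        PySem.Chars.startswith tu.toList (w ++ [' ']) = decide (hd = w) := by
      intro w hw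
      rw [hr]
      by_cases h : hd = w
      · subst h
        simp [(startswith_part hd hd r hhd hw).2 rfl]
      · cases hx : PySem.Chars.startswith (hd ++ ' ' :: r) (w ++ [' ']) with
        | false => simp [h]
        | true => exact absurd ((startswith_part hd w r hhd hw).1 hx).symm h
    have p1 : PySem.Chars.startswith tu.toList ['T','O','D','O',' '] = decide (hd = ['T','O','D','O']) := by
      simpa using hsw ['T','O','D','O'] (by decide)
    have p2 : PySem.Chars.startswith tu.toList ['D','O','N','E',' '] = decide (hd = ['D','O','N','E']) := by
      simpa using hsw ['D','O','N','E'] (by decide)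
    have p3 : PySem.Chars.startswith tu.toList ['W','E','A','T','H','E','R',' '] = decide (hd = ['W','E','A','T','H','E','R']) := by
      simpa using hsw ['W','E','A','T','H','E','R'] (by decide)
    have p4 : PySem.Chars.startswith tu.toList ['T','I','M','E','R',' '] = decide (hd = ['T','I','M','E','R']) := by
      simpa using hsw ['T','I','M','E','R'] (by decide)
    have p5 : PySem.Chars.startswith tu.toList ['C','A','L','L',' '] = decide (hd = ['C','A','L','L']) := by
      simpa using hsw ['C','A','L','L'] (by decide)
    have p6 : PySem.Chars.startswith tu.toList ['C','O','N','T','A','C','T',' '] = decide (hd = ['C','O','N','T','A','C','T']) := by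
      simpa using hsw ['C','O','N','T','A','C','T'] (by decide)
    have p7 : PySem.Chars.startswith tu.toList ['R','A','I','N',' '] = decide (hd = ['R','A','I','N']) := by
      simpa using hsw ['R','A','I','N'] (by decide)
    have p8 : PySem.Chars.startswith tu.toList ['R','E','M','I','N','D',' '] = decide (hd = ['R','E','M','I','N','D']) := by
      simpa using hsw ['R','E','M','I','N','D'] (by decide)
    have p9 : PySem.Chars.startswith tu.toList ['N','A','V',' '] = decide (hd = ['N','A','V']) := by
      simpa using hsw ['N','A','V'] (by decide)
    have hmk : ∀ (s : String), (String.ofList hd = s) ↔ hd = s.toList := by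
      intro s
      constructor
      · intro h; rw [← String.toList_ofList (l := hd), h]
      · intro h; rw [h, String.ofList_toList]
    rw [hkw]
    by_cases q1 : hd = ['T','O','D','O']
    · subst q1
      simp_all [PySem.Str.startswith,
        (show ("TODO ").toList = ['T','O','D','O',' '] from rfl),
        (show ("DONE ").toList = ['D','O','N','E',' '] from rfl),
        (show ("WEATHER ").toList = ['W','E','A','T','H','E','R',' '] from rfl),
        (show ("TIMER ").toList = ['T','I','M','E','R',' '] from rfl),
        (show ("CALL ").toList = ['C','A','L','L',' '] from rfl),
        (show ("CONTACT ").toList = ['C','O','N','T','A','C','T',' '] from rfl),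
        (show ("RAIN ").toList = ['R','A','I','N',' '] from rfl),
        (show ("REMIND ").toList = ['R','E','M','I','N','D',' '] from rfl),
        (show ("NAV ").toList = ['N','A','V',' '] from rfl),
        hP, pvAnyTail, pvNoTail, pvNeedTail, hmk]
    by_cases q2 : hd = ['D','O','N','E']
    · subst q2
      simp_all [PySem.Str.startswith,
        (show ("TODO ").toList = ['T','O','D','O',' '] from rfl),
        (show ("DONE ").toList = ['D','O','N','E',' '] from rfl),
        (show ("WEATHER ").toList = ['W','E','A','T','H','E','R',' '] from rfl),
        (show ("TIMER ").toList = ['T','I','M','E','R',' '] from rfl),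
        (show ("CALL ").toList = ['C','A','L','L',' '] from rfl),
        (show ("CONTACT ").toList = ['C','O','N','T','A','C','T',' '] from rfl),
        (show ("RAIN ").toList = ['R','A','I','N',' '] from rfl),
        (show ("REMIND ").toList = ['R','E','M','I','N','D',' '] from rfl),
        (show ("NAV ").toList = ['N','A','V',' '] from rfl),
        hP, pvAnyTail, pvNoTail, pvNeedTail, hmk]
    by_cases q3 : hd = ['W','E','A','T','H','E','R']
    · subst q3
      simp_all [PySem.Str.startswith,
        (show ("TODO ").toList = ['T','O','D','O',' '] from rfl),
        (show ("DONE ").toList = ['D','O','N','E',' '] from rfl),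
        (show ("WEATHER ").toList = ['W','E','A','T','H','E','R',' '] from rfl),
        (show ("TIMER ").toList = ['T','I','M','E','R',' '] from rfl),
        (show ("CALL ").toList = ['C','A','L','L',' '] from rfl),
        (show ("CONTACT ").toList = ['C','O','N','T','A','C','T',' '] from rfl),
        (show ("RAIN ").toList = ['R','A','I','N',' '] from rfl),
        (show ("REMIND ").toList = ['R','E','M','I','N','D',' '] from rfl),
        (show ("NAV ").toList = ['N','A','V',' '] from rfl),
        hP, pvAnyTail, pvNoTail, pvNeedTail, hmk]
    by_cases q4 : hd = ['T','I','M','E','R']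
    · subst q4
      simp_all [PySem.Str.startswith,
        (show ("TODO ").toList = ['T','O','D','O',' '] from rfl),
        (show ("DONE ").toList = ['D','O','N','E',' '] from rfl),
        (show ("WEATHER ").toList = ['W','E','A','T','H','E','R',' '] from rfl),
        (show ("TIMER ").toList = ['T','I','M','E','R',' '] from rfl),
        (show ("CALL ").toList = ['C','A','L','L',' '] from rfl),
        (show ("CONTACT ").toList = ['C','O','N','T','A','C','T',' '] from rfl),
        (show ("RAIN ").toList = ['R','A','I','N',' '] from rfl),
        (show ("REMIND ").toList = ['R','E','M','I','N','D',' '] from rfl),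
        (show ("NAV ").toList = ['N','A','V',' '] from rfl),
        hP, pvAnyTail, pvNoTail, pvNeedTail, hmk]
    by_cases q5 : hd = ['C','A','L','L']
    · subst q5
      simp_all [PySem.Str.startswith,
        (show ("TODO ").toList = ['T','O','D','O',' '] from rfl),
        (show ("DONE ").toList = ['D','O','N','E',' '] from rfl),
        (show ("WEATHER ").toList = ['W','E','A','T','H','E','R',' '] from rfl),
        (show ("TIMER ").toList = ['T','I','M','E','R',' '] from rfl),
        (show ("CALL ").toList = ['C','A','L','L',' '] from rfl),
        (show ("CONTACT ").toList = ['C','O','N','T','A','C','T',' '] from rfl),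
        (show ("RAIN ").toList = ['R','A','I','N',' '] from rfl),
        (show ("REMIND ").toList = ['R','E','M','I','N','D',' '] from rfl),
        (show ("NAV ").toList = ['N','A','V',' '] from rfl),
        hP, pvAnyTail, pvNoTail, pvNeedTail, hmk]
    by_cases q6 : hd = ['C','O','N','T','A','C','T']
    · subst q6
      simp_all [PySem.Str.startswith,
        (show ("TODO ").toList = ['T','O','D','O',' '] from rfl),
        (show ("DONE ").toList = ['D','O','N','E',' '] from rfl),
        (show ("WEATHER ").toList = ['W','E','A','T','H','E','R',' '] from rfl),
        (show ("TIMER ").toList = ['T','I','M','E','R',' '] from rfl),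
        (show ("CALL ").toList = ['C','A','L','L',' '] from rfl),
        (show ("CONTACT ").toList = ['C','O','N','T','A','C','T',' '] from rfl),
        (show ("RAIN ").toList = ['R','A','I','N',' '] from rfl),
        (show ("REMIND ").toList = ['R','E','M','I','N','D',' '] from rfl),
        (show ("NAV ").toList = ['N','A','V',' '] from rfl),
        hP, pvAnyTail, pvNoTail, pvNeedTail, hmk]
    by_cases q7 : hd = ['R','A','I','N']
    · subst q7
      simp_all [PySem.Str.startswith,
        (show ("TODO ").toList = ['T','O','D','O',' '] from rfl),
        (show ("DONE ").toList = ['D','O','N','E',' '] from rfl),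
        (show ("WEATHER ").toList = ['W','E','A','T','H','E','R',' '] from rfl),
        (show ("TIMER ").toList = ['T','I','M','E','R',' '] from rfl),
        (show ("CALL ").toList = ['C','A','L','L',' '] from rfl),
        (show ("CONTACT ").toList = ['C','O','N','T','A','C','T',' '] from rfl),
        (show ("RAIN ").toList = ['R','A','I','N',' '] from rfl),
        (show ("REMIND ").toList = ['R','E','M','I','N','D',' '] from rfl),
        (show ("NAV ").toList = ['N','A','V',' '] from rfl),
        hP, pvAnyTail, pvNoTail, pvNeedTail, hmk]
    by_cases q8 : hd = ['R','E','M','I','N','D']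
    · subst q8
      simp_all [PySem.Str.startswith,
        (show ("TODO ").toList = ['T','O','D','O',' '] from rfl),
        (show ("DONE ").toList = ['D','O','N','E',' '] from rfl),
        (show ("WEATHER ").toList = ['W','E','A','T','H','E','R',' '] from rfl),
        (show ("TIMER ").toList = ['T','I','M','E','R',' '] from rfl),
        (show ("CALL ").toList = ['C','A','L','L',' '] from rfl),
        (show ("CONTACT ").toList = ['C','O','N','T','A','C','T',' '] from rfl),
        (show ("RAIN ").toList = ['R','A','I','N',' '] from rfl),
        (show ("REMIND ").toList = ['R','E','M','I','N','D',' '] from rfl),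
        (show ("NAV ").toList = ['N','A','V',' '] from rfl),
        hP, pvAnyTail, pvNoTail, pvNeedTail, hmk]
    by_cases q9 : hd = ['N','A','V']
    · subst q9
      simp_all [PySem.Str.startswith,
        (show ("TODO ").toList = ['T','O','D','O',' '] from rfl),
        (show ("DONE ").toList = ['D','O','N','E',' '] from rfl),
        (show ("WEATHER ").toList = ['W','E','A','T','H','E','R',' '] from rfl),
        (show ("TIMER ").toList = ['T','I','M','E','R',' '] from rfl),
        (show ("CALL ").toList = ['C','A','L','L',' '] from rfl),
        (show ("CONTACT ").toList = ['C','O','N','T','A','C','T',' '] from rfl),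
        (show ("RAIN ").toList = ['R','A','I','N',' '] from rfl),
        (show ("REMIND ").toList = ['R','E','M','I','N','D',' '] from rfl),
        (show ("NAV ").toList = ['N','A','V',' '] from rfl),
        hP, pvAnyTail, pvNoTail, pvNeedTail, hmk]
    simp_all [PySem.Str.startswith,
        (show ("TODO ").toList = ['T','O','D','O',' '] from rfl),
        (show ("DONE ").toList = ['D','O','N','E',' '] from rfl),
        (show ("WEATHER ").toList = ['W','E','A','T','H','E','R',' '] from rfl),
        (show ("TIMER ").toList = ['T','I','M','E','R',' '] from rfl),
        (show ("CALL ").toList = ['C','A','L','L',' '] from rfl),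
        (show ("CONTACT ").toList = ['C','O','N','T','A','C','T',' '] from rfl),
        (show ("RAIN ").toList = ['R','A','I','N',' '] from rfl),
        (show ("REMIND ").toList = ['R','E','M','I','N','D',' '] from rfl),
        (show ("NAV ").toList = ['N','A','V',' '] from rfl),
        hP, pvAnyTail, pvNoTail, pvNeedTail, hmk]
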